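-- pv_equiv track=rewrite | github.com/ljm0850/algo-problem | baekjoon/1059 좋은 구간.py | solve
-- ===== SOURCE A (Python) =====
-- def solve(group:list[int],n:int)->int:
--     for idx in range(len(group)):
--         num = group[idx]
--         if num >= n:
--             max_num = num
--             if idx == 0:
--                 min_num = 1
--             else:
--                 min_num = group[idx-1]+1
--             break
--     cnt = 0
--     for num1 in range(min_num,max_num):
--         for num2 in range(num1+1,max_num):
--             if num1<=n<=num2:
--                 cnt += 1
--     return cnt
-- ===== SOURCE B (Python) =====
-- def solve(group, n):
--     min_num = 1
--     for num in group:
--         if num >= n: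
--             max_num = num
--             break
--         min_num = num + 1
--     lo = n - min_num
--     hi = max_num - 1 - n
--     if lo < 0:
--         return 0
--     return lo * (hi + 1) + max(hi, 0)
-- ===== Notes on version B (the rewrite author's own statement) =====
-- stated objective: faster
-- what changed: A counts good intervals with a quadratic double loop over range(min_num,max_num); B computes the count by a closed-form product (n-min_num)*(max_num-n) plus max(max_num-1-n,0) after the same single scan for the bracketing group element.
import Mathlib
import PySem

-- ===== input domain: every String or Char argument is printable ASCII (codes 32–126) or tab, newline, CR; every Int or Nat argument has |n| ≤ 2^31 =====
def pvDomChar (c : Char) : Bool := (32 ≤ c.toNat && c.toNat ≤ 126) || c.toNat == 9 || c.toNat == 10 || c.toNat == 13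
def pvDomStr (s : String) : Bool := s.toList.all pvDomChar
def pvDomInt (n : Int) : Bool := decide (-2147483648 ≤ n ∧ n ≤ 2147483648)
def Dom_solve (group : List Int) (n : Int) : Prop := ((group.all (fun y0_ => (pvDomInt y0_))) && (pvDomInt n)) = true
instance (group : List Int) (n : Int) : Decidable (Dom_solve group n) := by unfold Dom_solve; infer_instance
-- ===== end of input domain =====

-- B replaces A's quadratic double loop over the interval by a closed-form product; objective: faster (asymptotic).

-- ===== PORT A =====
-- A's first loop: scan for the first element ≥ n, carrying the previous element
-- (group[idx-1]); returns (min_num, max_num), none = the Python NameError (excluded by Pre_).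
def solveScanA (n : Int) : List Int → Option Int → Option (Int × Int)
  | [], _ => none
  | num :: rest, prev =>
    if num ≥ n then some ((match prev with | none => 1 | some p => p + 1), num)
    else solveScanA n rest (some num)

def solve (group : List Int) (n : Int) : Int :=
  match solveScanA n group none with
  | none => 0   -- unreachable under Pre_solve (Python raises NameError)
  | some (min_num, max_num) =>
    (PySem.List.pyRange min_num max_num 1).foldl (fun cnt num1 =>
      (PySem.List.pyRange (num1 + 1) max_num 1).foldl (fun cnt num2 =>
        if num1 ≤ n ∧ n ≤ num2 then cnt + 1 else cnt) cnt) 0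

-- ===== PORT B =====
-- B's loop: min_num starts at 1 and is bumped past each too-small element; break on first ≥ n.
def solveScanB (n : Int) : List Int → Int → Option (Int × Int)
  | [], _ => none
  | num :: rest, min_num =>
    if num ≥ n then some (min_num, num) else solveScanB n rest (num + 1)

def solve_alt (group : List Int) (n : Int) : Int :=
  match solveScanB n group 1 with
  | none => 0   -- unreachable under Pre_solve (Python raises NameError)
  | some (min_num, max_num) =>
    let lo := n - min_num
    let hi := max_num - 1 - n
    if lo < 0 then 0 else lo * (hi + 1) + max hi 0

-- ===== PRECONDITION & SPEC =====
-- Pre_ excludes inputs where no element of group is ≥ n: there A (and B) raise NameError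
-- (min_num/max_num never assigned), returning no value.
def Pre_solve (group : List Int) (n : Int) : Prop := group.any (fun x => decide (n ≤ x)) = true
instance (group : List Int) (n : Int) : Decidable (Pre_solve group n) := by unfold Pre_solve; infer_instance
def pvWitness_solve : List Int × Int := ([3, 10], 7)

def Spec_solve (group : List Int) (n : Int) (out : Int) : Prop := out = solve_alt group n
instance (group : List Int) (n : Int) (out : Int) : Decidable (Spec_solve group n out) := by unfold Spec_solve; infer_instance

-- ===== CLAIM (what is proved, stated in full; the proofs are below) =====
def Claim_equal_solve : Prop := ∀ (group : List Int) (n : Int), Dom_solve group n → Pre_solve group n → Spec_solve group n (solve group n)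

-- ===== LEMMAS AND PROOFS =====

-- The two scans agree (B keeps min_num = prev+1 incrementally).
theorem scanA_eq_scanB (n : Int) (group : List Int) (prev : Option Int) :
    solveScanA n group prev
      = solveScanB n group (match prev with | none => 1 | some p => p + 1) := by
  induction group generalizing prev with
  | nil => rfl
  | cons num rest ih =>
    simp only [solveScanA, solveScanB]
    split
    · rfl
    · exact ih (some num)

-- The scan's max_num is ≥ n.
theorem scanB_le (n : Int) (group : List Int) (m mn mx : Int)
    (h : solveScanB n group m = some (mn, mx)) : n ≤ mx := by
  induction group generalizing m with
  | nil => simp [solveScanB] at h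
  | cons num rest ih =>
    simp only [solveScanB] at h
    split at h
    · cases h; omega
    · exact ih _ h

-- Inner loop: counts num2 ∈ [a, mx) with num1 ≤ n ∧ n ≤ num2.
theorem inner_count (num1 n a mx : Int) (c : Int) :
    (PySem.List.pyRange a mx 1).foldl (fun cnt num2 =>
        if num1 ≤ n ∧ n ≤ num2 then cnt + 1 else cnt) c
      = c + (if num1 ≤ n then max 0 (mx - max a n) else 0) := by
  by_cases hab : a < mx
  · rw [PySem.List.pyRange_one_cons hab]
    simp only [List.foldl_cons]
    rw [inner_count num1 n (a+1) mx]
    by_cases h1 : num1 ≤ n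
    · by_cases h2 : n ≤ a
      · simp only [if_pos (⟨h1, h2⟩ : num1 ≤ n ∧ n ≤ a), if_pos h1]; omega
      · simp only [if_neg (by omega : ¬(num1 ≤ n ∧ n ≤ a)), if_pos h1]; omega
    · simp [h1]
  · rw [PySem.List.pyRange_one_eq_nil (by omega)]
    simp; omega
termination_by (mx - a).toNat
decreasing_by omega

-- Outer loop: sum the inner closed form over num1 ∈ [mn, mx), given n ≤ mx.
theorem outer_count (n mn mx : Int) (hmx : n ≤ mx) (c : Int) :
    (PySem.List.pyRange mn mx 1).foldl (fun cnt num1 =>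
      (PySem.List.pyRange (num1 + 1) mx 1).foldl (fun cnt num2 =>
        if num1 ≤ n ∧ n ≤ num2 then cnt + 1 else cnt) cnt) c
      = c + (if n - mn < 0 then 0 else (n - mn) * (mx - 1 - n + 1) + max (mx - 1 - n) 0) := by
  by_cases hab : mn < mx
  · rw [PySem.List.pyRange_one_cons hab]
    simp only [List.foldl_cons]
    rw [inner_count, outer_count n (mn+1) mx hmx]
    by_cases h1 : mn ≤ n
    · simp only [if_pos h1]
      by_cases h2 : mn < n
      · have : max (mn+1) n = n := by omega
        rw [this, if_neg (by omega : ¬ n - mn < 0), if_neg (by omega : ¬ n - (mn+1) < 0)]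
        have hprod : (n - mn) * (mx - 1 - n + 1) = (n - (mn+1)) * (mx - 1 - n + 1) + (mx - n) := by ring
        omega
      · have hmn : mn = n := by omega
        subst hmn
        have : max (mn+1) mn = mn + 1 := by omega
        rw [this, if_neg (by omega : ¬ mn - mn < 0), if_pos (by omega : mn - (mn+1) < 0)]
        omega
    · simp only [if_neg h1, if_pos (by omega : n - mn < 0),
        if_pos (by omega : n - (mn+1) < 0)]
      omega
  · rw [PySem.List.pyRange_one_eq_nil (by omega)]
    simp only [List.foldl_nil]
    by_cases h : n - mn < 0
    · simp [h]
    · have h1 : mn = n := by omega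
      have h2 : mx = n := by omega
      rw [h1, h2]
      norm_num
termination_by (mx - mn).toNat
decreasing_by omega

-- ===== VERDICT (by name: the statement is the Claim_ definition above) =====
theorem solve_spec : Claim_equal_solve := by
  intro group n _ hpre
  unfold Spec_solve solve solve_alt
  rw [scanA_eq_scanB]
  cases h : solveScanB n group 1 with
  | none => rfl
  | some p =>
    obtain ⟨mn, mx⟩ := p
    have hmx := scanB_le n group 1 mn mx h
    simp only
    rw [outer_count n mn mx hmx 0]
    simp
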